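-- pv_equiv track=rewrite | github.com/tsanders-rh/ops-translate | ops_translate/generate/workflow_to_ansible.py | _detect_action_call
-- ===== SOURCE A (Python) =====
-- def _detect_action_call(script: str) -> bool:
--     """
--     Detect if script contains calls to actions or external integrations.
--
--     Args:
--         script: JavaScript workflow script
--
--     Returns:
--         True if script contains action calls
--     """
--     action_patterns = [
--         "System.getModule",
--         ".getAction(",
--         "NSXClient",
--         "RESTHost",
--         "ServiceNowClient",
--         "InfobloxClient",
--         "AD:",  # Active Directory plugin
--         "SOAP:",  # SOAP plugin
--         "SQL:",  # SQL plugin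
--     ]
--
--     return any(pattern in script for pattern in action_patterns)
-- ===== SOURCE B (Python) =====
-- _ACTION_PATTERNS = (
--     "System.getModule",
--     ".getAction(",
--     "NSXClient",
--     "RESTHost",
--     "ServiceNowClient",
--     "InfobloxClient",
--     "AD:",
--     "SOAP:",
--     "SQL:",
-- )
--
--
-- def _detect_action_call(script: str) -> bool:
--     # Single left-to-right scan: at each position, test whether some
--     # pattern starts there (instead of nine independent substring scans).
--     for i in range(len(script) + 1):
--         for p in _ACTION_PATTERNS:
--             if script.startswith(p, i):
--                 return True
--     return False
-- ===== Notes on version B (the rewrite author's own statement) =====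
-- stated objective: alternative
-- what changed: Replaces nine independent substring-membership scans of the script with a single left-to-right scan over positions that tests each pattern as a prefix at the current position.
import Mathlib
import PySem

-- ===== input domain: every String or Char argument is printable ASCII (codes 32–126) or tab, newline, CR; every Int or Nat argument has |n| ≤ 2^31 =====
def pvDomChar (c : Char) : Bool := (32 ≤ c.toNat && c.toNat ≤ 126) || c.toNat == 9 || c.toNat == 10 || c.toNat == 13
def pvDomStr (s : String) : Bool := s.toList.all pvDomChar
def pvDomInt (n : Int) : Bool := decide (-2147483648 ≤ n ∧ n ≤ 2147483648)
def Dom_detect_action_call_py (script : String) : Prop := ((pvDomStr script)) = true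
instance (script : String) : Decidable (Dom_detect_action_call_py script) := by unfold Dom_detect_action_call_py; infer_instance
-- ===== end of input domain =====

-- B: one left-to-right scan over positions testing each pattern as a prefix, instead of A's nine substring scans.
-- ===== PORT A =====
def pvActionPatterns : List String :=
  ["System.getModule", ".getAction(", "NSXClient", "RESTHost",
   "ServiceNowClient", "InfobloxClient", "AD:", "SOAP:", "SQL:"]

def detect_action_call_py (script : String) : Bool :=
  pvActionPatterns.any (fun pattern => PySem.Str.isIn pattern script)

-- ===== PORT B =====
-- scan over positions: at each suffix, check whether some pattern is a prefix there
def pvScan (pats : List (List Char)) : List Char → Bool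
  | [] => pats.any (fun p => List.isPrefixOf p [])
  | c :: rest => pats.any (fun p => List.isPrefixOf p (c :: rest)) || pvScan pats rest

def detect_action_call_py_alt (script : String) : Bool :=
  pvScan (pvActionPatterns.map String.toList) script.toList

-- ===== PRECONDITION & SPEC =====
def Spec_detect_action_call_py (script : String) (out : Bool) : Prop := out = detect_action_call_py_alt script
instance (script : String) (out : Bool) : Decidable (Spec_detect_action_call_py script out) := by unfold Spec_detect_action_call_py; infer_instance

-- ===== CLAIM (what is proved, stated in full; the proofs are below) =====
def Claim_equal_detect_action_call_py : Prop := ∀ (script : String), Dom_detect_action_call_py script → Spec_detect_action_call_py script (detect_action_call_py script)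

-- ===== LEMMAS AND PROOFS =====
theorem pvScan_iff (pats : List (List Char)) (l : List Char) :
    pvScan pats l = true ↔ ∃ p ∈ pats, p <:+: l := by
  induction l with
  | nil => simp [pvScan]
  | cons c rest ih =>
    simp [pvScan, ih, List.infix_cons_iff, List.IsPrefix]
    constructor
    · rintro (⟨p, hp, h⟩ | ⟨p, hp, h⟩)
      · exact ⟨p, hp, Or.inl h⟩
      · exact ⟨p, hp, Or.inr h⟩
    · rintro ⟨p, hp, h | h⟩
      · exact Or.inl ⟨p, hp, h⟩
      · exact Or.inr ⟨p, hp, h⟩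

-- ===== VERDICT (by name: the statement is the Claim_ definition above) =====
theorem detect_action_call_py_spec : Claim_equal_detect_action_call_py := by
  intro script _
  unfold Spec_detect_action_call_py detect_action_call_py detect_action_call_py_alt
  rw [Bool.eq_iff_iff]
  simp only [List.any_eq_true, PySem.Str.isIn_iff_infix, pvScan_iff, List.mem_map]
  constructor
  · rintro ⟨p, hp, h⟩; exact ⟨p.toList, ⟨p, hp, rfl⟩, h⟩
  · rintro ⟨q, ⟨p, hp, rfl⟩, h⟩; exact ⟨p, hp, h⟩
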